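-- pv_equiv track=rewrite | github.com/XJ4v1erX/Lab2-Redes | Emisor/util.py | char_to_extended_ascii_bits
-- ===== SOURCE A (Python) =====
-- def char_to_extended_ascii_bits(char):
--     ascii_value = ord(char)
--     binary_representation = ''
--
--     while ascii_value > 0:
--         binary_representation = str(ascii_value % 2) + binary_representation
--         ascii_value = ascii_value // 2
--
--     # Agregar ceros a la izquierda para tener una longitud fija de 8 bits
--     binary_representation = binary_representation.zfill(8)
--
--     return binary_representation
-- ===== SOURCE B (Python) =====
-- def char_to_extended_ascii_bits(char):
--     return format(ord(char), '08b')
-- ===== Notes on version B (the rewrite author's own statement) =====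
-- stated objective: idiomatic
-- what changed: Replaces the hand-written while-loop bit extraction plus zfill with a single builtin closed-form call to format() with an 8-wide zero-padded binary spec.
import Mathlib
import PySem

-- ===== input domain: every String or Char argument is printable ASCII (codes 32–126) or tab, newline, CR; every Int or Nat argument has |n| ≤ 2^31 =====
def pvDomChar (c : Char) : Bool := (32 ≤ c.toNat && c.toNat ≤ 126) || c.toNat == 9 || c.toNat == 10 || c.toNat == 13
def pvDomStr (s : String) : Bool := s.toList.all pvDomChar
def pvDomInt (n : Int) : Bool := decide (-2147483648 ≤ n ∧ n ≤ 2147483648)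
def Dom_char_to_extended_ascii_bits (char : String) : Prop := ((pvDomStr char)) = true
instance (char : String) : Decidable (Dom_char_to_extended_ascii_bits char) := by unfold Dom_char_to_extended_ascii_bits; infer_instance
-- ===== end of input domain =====

-- B replaces A's hand-written while-loop bit extraction + zfill with the builtin closed form the builtin closed-form format call (8-wide zero-padded binary); idiomatic.


-- ===== PORT A =====
-- the while-loop: each iteration prepends str(v % 2) and halves v
-- structural fuel recursion (fuel = the value itself; v halves each step, so v steps always suffice)
def pvALoopF : Nat → Nat → List Char → List Char
  | 0, _, acc => acc
  | _+1, 0, acc => acc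
  | f+1, v+1, acc => pvALoopF f ((v+1) / 2) (Nat.digitChar ((v+1) % 2) :: acc)

def pvALoop (v : Nat) (acc : List Char) : List Char := pvALoopF v v acc

def char_to_extended_ascii_bits (char : String) : String :=
  match char.toList with
  | [c] =>
      let binary_representation := pvALoop c.toNat []
      String.mk (PySem.Chars.zfill binary_representation 8)
  | _ => ""          -- ord raises TypeError here; excluded by Pre_

-- ===== PORT B =====
def char_to_extended_ascii_bits_alt (char : String) : String :=
  match char.toList with
  | c :: rest =>
      if rest.isEmpty then
        -- format with zero-padded binary spec: binary digits, left-padded with '0' to width 8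
        let ds := Nat.toDigits 2 c.toNat
        String.mk (List.replicate (8 - ds.length) '0' ++ ds)
      else ""        -- ord raises TypeError here; excluded by Pre_
  | [] => ""         -- likewise excluded by Pre_

-- ===== PRECONDITION & SPEC =====
-- ord(char) raises TypeError unless char is exactly one character
def Pre_char_to_extended_ascii_bits (char : String) : Prop := char.toList.length = 1
instance (char : String) : Decidable (Pre_char_to_extended_ascii_bits char) := by unfold Pre_char_to_extended_ascii_bits; infer_instance
def pvWitness_char_to_extended_ascii_bits : String := "A"

def Spec_char_to_extended_ascii_bits (char : String) (out : String) : Prop := out = char_to_extended_ascii_bits_alt char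
instance (char : String) (out : String) : Decidable (Spec_char_to_extended_ascii_bits char out) := by unfold Spec_char_to_extended_ascii_bits; infer_instance

-- ===== CLAIM (what is proved, stated in full; the proofs are below) =====
def Claim_equal_char_to_extended_ascii_bits : Prop := ∀ (char : String), Dom_char_to_extended_ascii_bits char → Pre_char_to_extended_ascii_bits char → Spec_char_to_extended_ascii_bits char (char_to_extended_ascii_bits char)

-- ===== LEMMAS AND PROOFS =====
-- on the finite set of admitted character codes the two constructions agree
theorem pv_core_eq : ∀ n : Nat, n < 127 →
    PySem.Chars.zfill (pvALoop n []) 8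
      = List.replicate (8 - (Nat.toDigits 2 n).length) '0' ++ Nat.toDigits 2 n := by
  decide

-- ===== VERDICT (by name: the statement is the Claim_ definition above) =====
theorem char_to_extended_ascii_bits_spec : Claim_equal_char_to_extended_ascii_bits := by
  intro char hdom hpre
  unfold Spec_char_to_extended_ascii_bits char_to_extended_ascii_bits char_to_extended_ascii_bits_alt
  match h : char.toList with
  | [c] =>
      simp only []
      have hc : pvDomChar c = true := by
        have := hdom
        unfold Dom_char_to_extended_ascii_bits pvDomStr at this
        rw [h] at this
        simpa using this
      have hlt : c.toNat < 127 := by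
        unfold pvDomChar at hc
        simp only [Bool.or_eq_true, Bool.and_eq_true, decide_eq_true_eq, beq_iff_eq] at hc
        omega
      simpa using congrArg String.mk (pv_core_eq c.toNat hlt)
  | [] => simp [Pre_char_to_extended_ascii_bits, h] at hpre
  | _ :: _ :: _ => simp [Pre_char_to_extended_ascii_bits, h] at hpre
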